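-- pv_equiv track=rewrite | github.com/gavindanek-ux/poker_decision_ml | parse_irc.py | parse_action_string
-- ===== SOURCE A (Python) =====
-- def parse_action_string(s: str) -> list[str]:
--     """
--     Converts an action string like 'Brc200f' into tokens ['B','r','c','r200','f'].
--     Numeric amounts are attached to the preceding raise action.
--     """
--     if not s or s.strip() in ("-", ""):
--         return []
--     tokens = []
--     i = 0
--     while i < len(s):
--         ch = s[i]
--         if ch in "BfckrAqQ":
--             # collect following digits as amount
--             j = i + 1
--             while j < len(s) and s[j].isdigit():
--                 j += 1
--             tokens.append(s[i:j])
--             i = j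
--         else:
--             i += 1
--     return tokens
-- ===== SOURCE B (Python) =====
-- def parse_action_string(s: str) -> list[str]:
--     """Single-pass state machine: append action chars as new tokens and
--     attach digit chars to the last token while a digit run is open."""
--     tokens = []
--     attach = False
--     for ch in s:
--         if ch in "BfckrAqQ":
--             tokens.append(ch)
--             attach = True
--         elif attach and ch.isdigit():
--             tokens[-1] += ch
--         else:
--             attach = False
--     return tokens
-- ===== Notes on version B (the rewrite author's own statement) =====
-- stated objective: simpler
-- what changed: Replaces the index-based while-loop with inner digit-scan, slicing and a redundant early-return guard (which only short-circuits inputs containing no action characters, where the fold already yields the empty list) by a single-pass state-machine fold that appends action chars as tokens and attaches digit chars to the last open token; direct per-character iteration avoids repeated indexing and slicing.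
import Mathlib
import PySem

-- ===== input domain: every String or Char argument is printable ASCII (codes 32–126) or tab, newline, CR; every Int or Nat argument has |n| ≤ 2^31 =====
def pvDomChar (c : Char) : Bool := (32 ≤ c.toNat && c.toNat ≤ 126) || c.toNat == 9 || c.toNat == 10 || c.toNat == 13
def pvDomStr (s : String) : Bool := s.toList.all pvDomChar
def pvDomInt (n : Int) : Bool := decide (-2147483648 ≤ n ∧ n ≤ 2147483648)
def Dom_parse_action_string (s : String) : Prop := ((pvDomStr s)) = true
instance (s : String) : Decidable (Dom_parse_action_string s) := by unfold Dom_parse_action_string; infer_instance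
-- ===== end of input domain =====

-- B replaces A's index-and-slice while-loop (with its redundant early-return guard) by a
-- single-pass state-machine fold over the characters; return values are identical.

-- ===== PORT A =====
-- the while-loop: each step either emits s[i:j] (action char plus the following
-- digit run, collected by the inner while) and jumps i to j, or advances i by one
def pvGoA : List Char → List String
  | [] => []
  | c :: rest =>
    if PySem.Chars.isIn [c] "BfckrAqQ".toList then
      String.ofList (c :: rest.takeWhile PySem.Chars.isdigit)
        :: pvGoA (rest.dropWhile PySem.Chars.isdigit)
    else
      pvGoA rest
termination_by cs => cs.length
decreasing_by
  · have := List.length_dropWhile_le (p := PySem.Chars.isdigit) rest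
    simp; omega
  · simp

def parse_action_string (s : String) : List String :=
  if s.toList = [] ∨ PySem.Str.strip s = "-" ∨ PySem.Str.strip s = "" then []
  else pvGoA s.toList

-- ===== PORT B =====
-- tokens[-1] += ch
def pvAppendLast : List String → Char → List String
  | [], _ => []
  | [t], c => [t.push c]
  | t :: u :: ts, c => t :: pvAppendLast (u :: ts) c

-- one loop-body step of B over state (tokens, attach)
def pvStepB (st : List String × Bool) (c : Char) : List String × Bool :=
  if PySem.Chars.isIn [c] "BfckrAqQ".toList then (st.1 ++ [String.ofList [c]], true)
  else if st.2 && PySem.Chars.isdigit c then (pvAppendLast st.1 c, true)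
  else (st.1, false)

def parse_action_string_alt (s : String) : List String :=
  (s.toList.foldl pvStepB ([], false)).1

-- ===== PRECONDITION & SPEC =====
def Spec_parse_action_string (s : String) (out : List String) : Prop := out = parse_action_string_alt s
instance (s : String) (out : List String) : Decidable (Spec_parse_action_string s out) := by unfold Spec_parse_action_string; infer_instance

-- ===== CLAIM (what is proved, stated in full; the proofs are below) =====
def Claim_equal_parse_action_string : Prop := ∀ (s : String), Dom_parse_action_string s → Spec_parse_action_string s (parse_action_string s)

-- ===== LEMMAS AND PROOFS =====

-- a digit character is never one of the action characters
lemma pv_digit_not_action (c : Char) (h : PySem.Chars.isdigit c = true) :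
    PySem.Chars.isIn [c] "BfckrAqQ".toList = false := by
  by_contra hb
  have : PySem.Chars.isIn [c] "BfckrAqQ".toList = true := by
    cases hx : PySem.Chars.isIn [c] "BfckrAqQ".toList with
    | false => exact absurd hx hb
    | true => rfl
  have hin : ([c] : List Char) <:+: "BfckrAqQ".toList :=
    (PySem.Chars.isIn_iff_infix _ _).mp this
  have hm : c ∈ "BfckrAqQ".toList := hin.subset (by simp)
  simp [PySem.Chars.isdigit] at h
  rcases (by simpa using hm : c = 'B' ∨ c = 'f' ∨ c = 'c' ∨ c = 'k' ∨ c = 'r' ∨ c = 'A' ∨ c = 'q' ∨ c = 'Q') with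
    rfl | rfl | rfl | rfl | rfl | rfl | rfl | rfl <;> revert h <;> decide

lemma pv_appendLast_append (ts : List String) (t : String) (c : Char) :
    pvAppendLast (ts ++ [t]) c = ts ++ [t.push c] := by
  induction ts with
  | nil => rfl
  | cons u us ih =>
    cases us with
    | nil => simp [pvAppendLast]
    | cons v vs => simpa [pvAppendLast] using ih

-- a fold that starts with attach = true on a list whose head is not a digit
-- proceeds exactly like one that starts with attach = false
lemma pv_fold_true_false (rest : List Char) (ts : List String)
    (h : ∀ c, rest.head? = some c → PySem.Chars.isdigit c = false) :
    (rest.foldl pvStepB (ts, true)).1 = (rest.foldl pvStepB (ts, false)).1 := by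
  cases rest with
  | nil => rfl
  | cons c r =>
    have hd : PySem.Chars.isdigit c = false := h c rfl
    cases ha : PySem.Chars.isIn [c] "BfckrAqQ".toList with
    | true => simp only [List.foldl, pvStepB, ha, if_true]
    | false => simp only [List.foldl, pvStepB, ha, Bool.false_eq_true, if_false, hd,
        Bool.and_false, Bool.false_and]

-- with attach = true, the fold absorbs the leading digit run into the last token
lemma pv_fold_true (rest : List Char) (ts : List String) (l : List Char) :
    (rest.foldl pvStepB (ts ++ [String.ofList l], true)).1 =
      ((rest.dropWhile PySem.Chars.isdigit).foldl pvStepB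
        (ts ++ [String.ofList (l ++ rest.takeWhile PySem.Chars.isdigit)], false)).1 := by
  induction rest generalizing l with
  | nil => simp
  | cons c r ih =>
    by_cases hd : PySem.Chars.isdigit c = true
    · have ha := pv_digit_not_action c hd
      have hpush : (String.ofList l).push c = String.ofList (l ++ [c]) := by
        apply String.toList_injective; simp
      simp only [List.foldl, pvStepB, ha, hd, List.takeWhile_cons, List.dropWhile_cons,
        if_false, Bool.true_and, if_true, hpush, pv_appendLast_append]
      simpa using ih (l ++ [c])
    · have hd' : PySem.Chars.isdigit c = false := by
        cases hx : PySem.Chars.isdigit c with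
        | false => rfl
        | true => exact absurd hx hd
      have htw : (c :: r).takeWhile PySem.Chars.isdigit = [] := by
        simp [List.takeWhile_cons, hd']
      have hdw : (c :: r).dropWhile PySem.Chars.isdigit = c :: r := by
        simp [List.dropWhile_cons, hd']
      rw [htw, hdw]
      simpa using pv_fold_true_false (c :: r) (ts ++ [String.ofList l]) (by
        intro x hx
        simp only [List.head?] at hx
        cases hx; exact hd')

-- main invariant: B's fold from (ts, false) produces ts ++ A's loop output
lemma pv_main (cs : List Char) : ∀ ts : List String,
    (cs.foldl pvStepB (ts, false)).1 = ts ++ pvGoA cs := by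
  induction cs using pvGoA.induct with
  | case1 => intro ts; simp [pvGoA]
  | case2 c rest ha ih =>
    intro ts
    simp only [List.foldl, pvStepB, ha, if_true]
    rw [pv_fold_true rest ts [c], ih, pvGoA, if_pos ha]
    simp
  | case3 c rest ha ih =>
    intro ts
    have ha' : PySem.Chars.isIn [c] "BfckrAqQ".toList = false := by
      cases hx : PySem.Chars.isIn [c] "BfckrAqQ".toList with
      | false => rfl
      | true => exact absurd hx ha
    simp only [List.foldl, pvStepB, ha', Bool.false_eq_true, if_false, Bool.false_and]
    rw [ih, pvGoA, if_neg ha]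

-- every character of cs is whitespace or survives into dropWhile isspace
lemma pv_mem_dropWhile (cs : List Char) (c : Char) (h : c ∈ cs) :
    PySem.Chars.isspace c = true ∨ c ∈ cs.dropWhile PySem.Chars.isspace := by
  induction cs with
  | nil => cases h
  | cons x xs ih =>
    by_cases hx : PySem.Chars.isspace x = true
    · rw [List.dropWhile_cons_of_pos hx]
      rcases List.mem_cons.mp h with rfl | h'
      · exact Or.inl hx
      · exact ih h'
    · rw [List.dropWhile_cons_of_neg hx]
      exact Or.inr h

lemma pv_mem_strip (cs : List Char) (c : Char) (h : c ∈ cs) :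
    PySem.Chars.isspace c = true ∨ c ∈ PySem.Chars.strip cs := by
  rcases pv_mem_dropWhile cs c h with hs | h1
  · exact Or.inl hs
  · rcases pv_mem_dropWhile (PySem.Chars.lstrip cs).reverse c (by
      simpa [PySem.Chars.lstrip] using h1) with hs | h2
    · exact Or.inl hs
    · exact Or.inr (by simpa [PySem.Chars.strip, PySem.Chars.rstrip] using h2)

-- A's loop yields no token on strings made of whitespace and '-' only
lemma pv_goA_nil (cs : List Char) (h : ∀ c ∈ cs, PySem.Chars.isspace c = true ∨ c = '-') :
    pvGoA cs = [] := by
  induction cs with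
  | nil => simp [pvGoA]
  | cons c rest ih =>
    have ha : PySem.Chars.isIn [c] "BfckrAqQ".toList = false := by
      by_contra hb
      have : PySem.Chars.isIn [c] "BfckrAqQ".toList = true := by
        cases hx : PySem.Chars.isIn [c] "BfckrAqQ".toList with
        | false => exact absurd hx hb
        | true => rfl
      have hin : ([c] : List Char) <:+: "BfckrAqQ".toList :=
        (PySem.Chars.isIn_iff_infix _ _).mp this
      have hm : c ∈ "BfckrAqQ".toList := hin.subset (by simp)
      have hc := h c (by simp)
      rcases (by simpa using hm : c = 'B' ∨ c = 'f' ∨ c = 'c' ∨ c = 'k' ∨ c = 'r' ∨ c = 'A' ∨ c = 'q' ∨ c = 'Q') with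
        rfl | rfl | rfl | rfl | rfl | rfl | rfl | rfl <;> revert hc <;> decide
    simp only [pvGoA, ha, if_false]
    exact ih (fun x hx => h x (List.mem_cons_of_mem _ hx))

-- ===== VERDICT (by name: the statement is the Claim_ definition above) =====
theorem parse_action_string_spec : Claim_equal_parse_action_string := by
  intro s _
  unfold Spec_parse_action_string parse_action_string parse_action_string_alt
  have halt : (s.toList.foldl pvStepB ([], false)).1 = pvGoA s.toList := by
    simpa using pv_main s.toList []
  rw [halt]
  split_ifs with hg
  · rcases hg with h0 | h1 | h2
    · simp [h0, pvGoA]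
    · refine (pv_goA_nil _ ?_).symm
      intro c hc
      rcases pv_mem_strip s.toList c hc with hs | hm
      · exact Or.inl hs
      · have : PySem.Chars.strip s.toList = ['-'] := by
          have := congrArg String.toList h1
          simpa [PySem.Str.strip] using this
        rw [this] at hm
        simpa using Or.inr (by simpa using hm)
    · refine (pv_goA_nil _ ?_).symm
      intro c hc
      rcases pv_mem_strip s.toList c hc with hs | hm
      · exact Or.inl hs
      · have : PySem.Chars.strip s.toList = [] := by
          have := congrArg String.toList h2
          simpa [PySem.Str.strip] using this
        rw [this] at hm
        cases hm
  · rfl
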